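-- pv_equiv track=rewrite | github.com/daniel-reich/ubiquitous-fiesta | tY5fmSbk85N8digXQ_3.py | ones_infection
-- ===== SOURCE A (Python) =====
-- def ones_infection(arr):
--   copy = arr.copy()
--   cols = []
--   for r in range(len(arr)):
--     for c in range(len(arr[0])):
--       if copy[r][c] == 1:
--         arr[r] = [1]*len(arr[r])
--         cols.append(c)
--   for col in cols:
--     for r in range(len(arr)):
--       arr[r][col] = 1
--   return arr
-- ===== SOURCE B (Python) =====
-- def ones_infection(arr):
--     if not arr or not arr[0]:
--         return [list(row) for row in arr]
--     row_has = [1 in row for row in arr]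
--     new_cols = []
--     for col in zip(*arr, strict=True):
--         if 1 in col:
--             new_cols.append((1,) * len(col))
--         else:
--             new_cols.append(tuple(1 if h else v for h, v in zip(row_has, col)))
--     return [list(cells) for cells in zip(*new_cols)]
-- ===== Notes on version B (the rewrite author's own statement) =====
-- stated objective: alternative
-- what changed: B builds the result column-major via double transposition (zip(*arr, strict=True)): each transposed column becomes all-1s if it contains a 1, otherwise cells are 1 exactly on flagged rows, then columns are transposed back; A instead mutates the grid in place, blasting a row per 1-cell and re-filling a column once per 1-cell found. B is pure while A mutates arr in place (return values agree).
-- outside the precondition, e.g. on ones_infection([[5], [0, 1]]): A returns [[5], [0, 1]], B raises ValueError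
import Mathlib
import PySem

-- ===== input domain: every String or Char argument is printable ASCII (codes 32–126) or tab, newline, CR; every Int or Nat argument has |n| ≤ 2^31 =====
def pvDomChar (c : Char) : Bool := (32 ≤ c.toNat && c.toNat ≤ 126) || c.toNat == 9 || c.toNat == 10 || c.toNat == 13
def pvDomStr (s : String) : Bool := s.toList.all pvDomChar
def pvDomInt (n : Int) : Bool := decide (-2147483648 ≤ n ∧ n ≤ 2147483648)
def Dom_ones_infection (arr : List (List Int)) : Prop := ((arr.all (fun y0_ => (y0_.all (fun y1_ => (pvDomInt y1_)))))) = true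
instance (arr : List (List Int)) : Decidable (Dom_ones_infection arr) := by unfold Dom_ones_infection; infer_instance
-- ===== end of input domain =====

-- B rebuilds the grid column-major via double transposition (zip(*arr)) instead of A's in-place
-- row blasting plus per-1-cell column refill; equivalence is about the RETURN value only:
-- A mutates arr in place, B is pure.

-- ===== PORT A =====
-- literal port of A: `copy = arr.copy()` is a shallow copy, and the row replacements in the first
-- loop never mutate the shared row objects, so reads of copy[r][c] see the original rows.
def ones_infection (arr : List (List Int)) : List (List Int) :=
  let copy := arr
  let st := (List.range arr.length).foldl
    (fun (st : List (List Int) × List Nat) r =>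
      (List.range ((st.1.headD []).length)).foldl
        (fun st2 c =>
          if ((copy.getD r []).getD c 0) == 1 then
            (st2.1.set r (List.replicate ((st2.1.getD r []).length) 1), st2.2 ++ [c])
          else st2)
        st)
    (arr, ([] : List Nat))
  st.2.foldl
    (fun a col =>
      (List.range a.length).foldl (fun a2 r => a2.set r ((a2.getD r []).set col 1)) a)
    st.1

-- ===== PORT B =====
-- port of Python's zip(*rows): truncates to the shortest row (exact on every input)
def pyZipStar (rows : List (List Int)) : List (List Int) :=
  if h : rows.isEmpty || rows.any (·.isEmpty) then []
  else rows.map (fun r => r.headD 0) :: pyZipStar (rows.map List.tail)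
termination_by (rows.headD []).length
decreasing_by
  simp only [Bool.or_eq_true, List.any_eq_true, List.isEmpty_iff, not_or, not_exists] at h
  cases rows with
  | nil => exact absurd rfl h.1
  | cons r rs =>
    have hr : r ≠ [] := fun he => h.2 r ⟨List.mem_cons_self, he⟩
    cases r with
    | nil => exact absurd rfl hr
    | cons a as => simp

def ones_infection_alt (arr : List (List Int)) : List (List Int) :=
  if arr.isEmpty || (arr.headD []).isEmpty then arr.map (fun row => row)
  else
    let row_has := arr.map (fun row => row.contains 1)
    let new_cols := (pyZipStar arr).map (fun col =>
      if col.contains 1 then List.replicate col.length (1 : Int)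
      else (row_has.zip col).map (fun p => if p.1 then 1 else p.2))
    pyZipStar new_cols

-- ===== PRECONDITION & SPEC =====
-- Pre_ excludes ragged grids (rows of unequal length): there A raises IndexError, or — when row 0
-- is the short one — silently ignores columns beyond row 0's width, an artefact of its
-- implementation; B's strict zip raises ValueError on every ragged grid with a nonempty first row
-- (grids whose first row is empty are never ragged for A — it scans no columns — so they stay inside).
def Pre_ones_infection (arr : List (List Int)) : Prop :=
  (arr.headD []) = [] ∨ ∀ row ∈ arr, row.length = (arr.headD []).length
instance (arr : List (List Int)) : Decidable (Pre_ones_infection arr) := by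
  unfold Pre_ones_infection; infer_instance
def pvWitness_ones_infection : List (List Int) := [[0, 1, 0], [2, 0, 0], [0, 0, 5]]
def Spec_ones_infection (arr : List (List Int)) (out : List (List Int)) : Prop := out = ones_infection_alt arr
instance (arr : List (List Int)) (out : List (List Int)) : Decidable (Spec_ones_infection arr out) := by unfold Spec_ones_infection; infer_instance

-- ===== CLAIM (what is proved, stated in full; the proofs are below) =====
def Claim_equal_ones_infection : Prop := ∀ (arr : List (List Int)), Dom_ones_infection arr → Pre_ones_infection arr → Spec_ones_infection arr (ones_infection arr)

-- ===== LEMMAS AND PROOFS =====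

def pvWidth (arr : List (List Int)) : Nat := (arr.headD []).length
def pvHit (arr : List (List Int)) (row : List Int) : Bool :=
  (List.range (pvWidth arr)).any (fun c => row.getD c 0 == 1)
def pvInfect (arr : List (List Int)) (row : List Int) : List Int :=
  if pvHit arr row then List.replicate row.length 1 else row
def pvOnes (arr : List (List Int)) (row : List Int) : List Nat :=
  (List.range (pvWidth arr)).filter (fun c => row.getD c 0 == 1)
def pvColsA (arr : List (List Int)) : List Nat := arr.flatMap (pvOnes arr)

theorem pvInfect_length (arr : List (List Int)) (row : List Int) :
    (pvInfect arr row).length = row.length := by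
  unfold pvInfect; split <;> simp

theorem A_inner (arr0 : List (List Int)) (r : Nat) (l : List Nat) :
    ∀ (st : List (List Int) × List Nat), r < st.1.length →
    l.foldl (fun st2 c =>
        if ((arr0.getD r []).getD c 0) == 1 then
          (st2.1.set r (List.replicate ((st2.1.getD r []).length) 1), st2.2 ++ [c])
        else st2) st
    = (if l.any (fun c => (arr0.getD r []).getD c 0 == 1) then
         st.1.set r (List.replicate ((st.1.getD r []).length) 1) else st.1,
       st.2 ++ l.filter (fun c => (arr0.getD r []).getD c 0 == 1)) := by
  induction l with
  | nil => intro st h; simp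
  | cons c cs ih =>
    intro st h
    simp only [List.foldl_cons]
    by_cases hc : ((arr0.getD r []).getD c 0) == 1
    · rw [if_pos hc, ih _ (by simpa using h)]
      have hget : ((st.1.set r (List.replicate ((st.1.getD r []).length) 1)).getD r [])
          = List.replicate ((st.1.getD r []).length) 1 := by
        simp [List.getD, List.getElem?_set_self, h]
      rw [hget, List.length_replicate, List.set_set]
      have hc' : (arr0.getD r []).getD c 0 = 1 := by simpa using hc
      simp only [List.getD] at hc'
      simp [List.any_cons, List.filter_cons, hc', List.append_assoc]
    · have hc' : ¬ (arr0.getD r []).getD c 0 = 1 := by simpa using hc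
      simp only [List.getD] at hc'
      rw [if_neg hc, ih _ h]
      simp [List.any_cons, List.filter_cons, hc']

theorem A_head_width (arr : List (List Int)) (j : Nat) :
    ((((arr.take j).map (pvInfect arr)) ++ arr.drop j).headD []).length = pvWidth arr := by
  cases arr with
  | nil => cases j <;> simp [pvWidth]
  | cons x xs =>
    cases j with
    | zero => simp [pvWidth]
    | succ j => simp [pvWidth, pvInfect_length]

theorem A_phase1 (arr : List (List Int)) : ∀ j, j ≤ arr.length →
    (List.range' 0 j).foldl
      (fun (st : List (List Int) × List Nat) r =>
        (List.range ((st.1.headD []).length)).foldl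
          (fun st2 c =>
            if ((arr.getD r []).getD c 0) == 1 then
              (st2.1.set r (List.replicate ((st2.1.getD r []).length) 1), st2.2 ++ [c])
            else st2)
          st)
      (arr, ([] : List Nat))
    = ((arr.take j).map (pvInfect arr) ++ arr.drop j, (arr.take j).flatMap (pvOnes arr)) := by
  intro j
  induction j with
  | zero => intro _; simp
  | succ j ih =>
    intro hj
    have hjlt : j < arr.length := hj
    have hlen1 : ((arr.take j).map (pvInfect arr)).length = j := by
      rw [List.length_map, List.length_take]; omega
    have hdrop : arr.drop j = arr[j] :: arr.drop (j + 1) := List.drop_eq_getElem_cons hjlt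
    have hgetj : ((arr.take j).map (pvInfect arr) ++ arr.drop j).getD j [] = arr[j] := by
      rw [List.getD, List.getElem?_append_right hlen1.le, hlen1]
      simp [List.getElem?_drop, List.getElem?_eq_getElem hjlt]
    have hlenj : j < ((arr.take j).map (pvInfect arr) ++ arr.drop j).length := by
      rw [List.length_append, hlen1, List.length_drop]
      omega
    have hset : ∀ v : List Int,
        ((arr.take j).map (pvInfect arr) ++ arr.drop j).set j v
        = (arr.take j).map (pvInfect arr) ++ v :: arr.drop (j + 1) := by
      intro v
      rw [List.set_append, if_neg (by rw [hlen1]; omega), hlen1, Nat.sub_self, hdrop]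
      rfl
    have htake : arr.take (j + 1) = arr.take j ++ [arr[j]] := by
      rw [List.take_succ, List.getElem?_eq_getElem hjlt]
      rfl
    have hgd : arr.getD j [] = arr[j] := List.getD_eq_getElem arr [] hjlt
    rw [List.range'_1_concat, List.foldl_append, ih (Nat.le_of_succ_le hj)]
    simp only [List.foldl_cons, List.foldl_nil, Nat.zero_add]
    rw [A_head_width, A_inner arr j _ _ hlenj, hgetj, Prod.mk.injEq]
    constructor
    · rw [hgd]
      by_cases hh : pvHit arr arr[j]
      · rw [if_pos (by simpa [pvHit] using hh)]
        change ((arr.take j).map (pvInfect arr) ++ arr.drop j).set j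
          (List.replicate arr[j].length 1) = _
        rw [hset, htake, List.map_append]
        simp [pvInfect, hh]
      · rw [if_neg (by simpa [pvHit] using hh)]
        change (arr.take j).map (pvInfect arr) ++ arr.drop j = _
        rw [htake, List.map_append, hdrop]
        simp [pvInfect, hh]
    · change (arr.take j).flatMap (pvOnes arr) ++ _ = _
      rw [htake, List.flatMap_append, hgd]
      simp [pvOnes]

theorem A_setcol (col : Nat) (a : List (List Int)) : ∀ j, j ≤ a.length →
    (List.range' 0 j).foldl (fun a2 r => a2.set r ((a2.getD r []).set col 1)) a
    = (a.take j).map (fun row => row.set col 1) ++ a.drop j := by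
  intro j
  induction j with
  | zero => intro _; simp
  | succ j ih =>
    intro hj
    have hjlt : j < a.length := hj
    have hlen1 : ((a.take j).map (fun row => row.set col 1)).length = j := by
      rw [List.length_map, List.length_take]; omega
    have hdrop : a.drop j = a[j] :: a.drop (j + 1) := List.drop_eq_getElem_cons hjlt
    have hgetj : ((a.take j).map (fun row => row.set col 1) ++ a.drop j).getD j [] = a[j] := by
      rw [List.getD, List.getElem?_append_right hlen1.le, hlen1]
      simp [List.getElem?_drop, List.getElem?_eq_getElem hjlt]
    have htake : a.take (j + 1) = a.take j ++ [a[j]] := by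
      rw [List.take_succ, List.getElem?_eq_getElem hjlt]
      rfl
    have hset : ((a.take j).map (fun row => row.set col 1) ++ a.drop j).set j (a[j].set col 1)
        = (a.take j).map (fun row => row.set col 1) ++ (a[j].set col 1) :: a.drop (j + 1) := by
      rw [List.set_append, if_neg (by rw [hlen1]; omega), hlen1, Nat.sub_self, hdrop]
      rfl
    rw [List.range'_1_concat, List.foldl_append, ih (Nat.le_of_succ_le hj)]
    simp only [List.foldl_cons, List.foldl_nil, Nat.zero_add]
    rw [hgetj, hset, htake, List.map_append]
    simp

theorem A_phase2 (cols : List Nat) : ∀ (a : List (List Int)),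
    cols.foldl (fun a col =>
      (List.range a.length).foldl (fun a2 r => a2.set r ((a2.getD r []).set col 1)) a) a
    = a.map (fun row => cols.foldl (fun row col => row.set col 1) row) := by
  induction cols with
  | nil => intro a; simp
  | cons col rest ih =>
    intro a
    simp only [List.foldl_cons]
    rw [List.range_eq_range', A_setcol col a a.length le_rfl]
    simp only [List.take_length, List.drop_length, List.append_nil]
    rw [ih, List.map_map]
    rfl

theorem A_eq (arr : List (List Int)) :
    ones_infection arr
    = (arr.map (pvInfect arr)).map
        (fun row => (pvColsA arr).foldl (fun row col => row.set col 1) row) := by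
  simp only [ones_infection]
  rw [List.range_eq_range', A_phase1 arr arr.length le_rfl]
  simp only [List.take_length, List.drop_length, List.append_nil]
  rw [A_phase2]
  rfl

theorem rowfold_length (cols : List Nat) (row : List Int) :
    (cols.foldl (fun row col => row.set col 1) row).length = row.length := by
  induction cols generalizing row with
  | nil => rfl
  | cons c cs ih => simp [List.foldl_cons, ih]

theorem rowfold_getD (cols : List Nat) (row : List Int) (c : Nat) (h : c < row.length) :
    (cols.foldl (fun row col => row.set col 1) row).getD c 0
    = if c ∈ cols then 1 else row.getD c 0 := by
  induction cols generalizing row with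
  | nil => simp
  | cons col rest ih =>
    simp only [List.foldl_cons]
    rw [ih _ (by simpa using h)]
    have hset : (row.set col 1).getD c 0 = if col = c then 1 else row.getD c 0 := by
      rw [List.getD_eq_getElem _ _ (by simpa using h), List.getElem_set]
      split_ifs with he
      · rfl
      · rw [List.getD_eq_getElem _ _ h]
    rw [hset]
    simp only [List.mem_cons]
    split_ifs with h1 h2 h3 h4 <;> tauto

theorem pvHit_iff (arr : List (List Int)) (row : List Int) (hlen : row.length = pvWidth arr) :
    pvHit arr row = true ↔ 1 ∈ row := by
  simp only [pvHit, List.any_eq_true, List.mem_range, beq_iff_eq]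
  constructor
  · rintro ⟨i, hi, h1⟩
    have hi' : i < row.length := by omega
    rw [List.getD_eq_getElem _ _ hi'] at h1
    exact h1 ▸ List.getElem_mem hi'
  · intro h1
    obtain ⟨i, hi, hei⟩ := List.mem_iff_getElem.mp h1
    exact ⟨i, by omega, by rw [List.getD_eq_getElem _ _ hi, hei]⟩

theorem pvColsA_mem (arr : List (List Int)) (c : Nat) :
    c ∈ pvColsA arr ↔ ∃ row ∈ arr, c < pvWidth arr ∧ row.getD c 0 = 1 := by
  simp only [pvColsA, List.mem_flatMap, pvOnes, List.mem_filter, List.mem_range, beq_iff_eq]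

-- closed form of pyZipStar on rectangular grids
theorem zipstar_char (w : Nat) : ∀ (rows : List (List Int)), rows ≠ [] →
    (∀ row ∈ rows, row.length = w) →
    pyZipStar rows = (List.range w).map (fun c => rows.map (fun row => row.getD c 0)) := by
  induction w with
  | zero =>
    intro rows hne hlen
    rw [pyZipStar]
    rw [dif_pos]
    · simp
    · cases rows with
      | nil => exact absurd rfl hne
      | cons r rs =>
        have : r = [] := List.eq_nil_of_length_eq_zero (hlen r List.mem_cons_self)
        subst this
        simp
  | succ w ih =>
    intro rows hne hlen
    rw [pyZipStar]
    rw [dif_neg]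
    · have hne' : rows.map List.tail ≠ [] := by
        simpa using hne
      have hlen' : ∀ row ∈ rows.map List.tail, row.length = w := by
        intro row hrow
        obtain ⟨r, hr, hrt⟩ := List.mem_map.mp hrow
        have := hlen r hr
        subst hrt
        simp [List.length_tail, this]
      rw [ih _ hne' hlen', List.range_succ_eq_map]
      simp only [List.map_cons, List.map_map]
      congr 1
      · apply List.map_congr_left
        intro r hr
        have : r.length = w + 1 := hlen r hr
        cases r with
        | nil => simp at this
        | cons a as => simp
      · apply List.map_congr_left
        intro c _
        simp only [Function.comp]
        apply List.map_congr_left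
        intro r hr
        have : r.length = w + 1 := hlen r hr
        cases r with
        | nil => simp at this
        | cons a as => simp [Nat.succ_eq_add_one]
    · simp only [Bool.or_eq_true, List.any_eq_true, List.isEmpty_iff, not_or, not_exists]
      refine ⟨hne, ?_⟩
      rintro r ⟨hr, he⟩
      have : r.length = w + 1 := hlen r hr
      subst he
      simp at this

-- ===== VERDICT (by name: the statement is the Claim_ definition above) =====
theorem ones_infection_spec : Claim_equal_ones_infection := by
  intro arr _ hpre
  unfold Spec_ones_infection
  rw [A_eq]
  simp only [ones_infection_alt]
  by_cases hdeg : (arr.isEmpty || (arr.headD []).isEmpty) = true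
  · rw [if_pos hdeg]
    -- degenerate: empty grid or zero-width first row; A scans no columns and returns arr unchanged
    have hwidth : pvWidth arr = 0 := by
      rcases Bool.or_eq_true_iff.mp hdeg with h | h
      · rw [List.isEmpty_iff] at h
        subst h
        rfl
      · rw [List.isEmpty_iff] at h
        show (arr.headD []).length = 0
        rw [h]
        rfl
    have hcols : pvColsA arr = [] := by
      unfold pvColsA
      apply List.flatMap_eq_nil_iff.mpr
      intro row _
      simp [pvOnes, hwidth]
    rw [hcols]
    simp only [List.foldl_nil]
    have hInf : ∀ row ∈ arr, pvInfect arr row = row := by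
      intro row _
      simp [pvInfect, pvHit, hwidth]
    calc (arr.map (pvInfect arr)).map (fun row => row)
        = arr.map (pvInfect arr) := List.map_id' _
      _ = arr.map (fun row => row) := List.map_congr_left hInf
  · rw [if_neg hdeg]
    simp only [Bool.or_eq_true, List.isEmpty_iff, not_or] at hdeg
    obtain ⟨hne, hhd⟩ := hdeg
    set w := pvWidth arr with hwdef
    have hwpos : 0 < w := by
      unfold pvWidth at hwdef
      rw [hwdef]
      exact List.length_pos_iff.mpr hhd
    have hrect : ∀ row ∈ arr, row.length = w := hpre.resolve_left hhd
    set R := arr.length with hRdef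
    have hRpos : 0 < R := List.length_pos_iff.mpr hne
    rw [zipstar_char w arr hne hrect]
    set f := fun (col : List Int) =>
      if col.contains 1 then List.replicate col.length (1 : Int)
      else ((arr.map (fun row => row.contains 1)).zip col).map (fun p => if p.1 then 1 else p.2)
      with hf
    have hfuse : ((List.range w).map (fun c => arr.map (fun row => row.getD c 0))).map f
        = (List.range w).map (fun c => f (arr.map (fun row => row.getD c 0))) := by
      rw [List.map_map]
      rfl
    rw [hfuse]
    have hcollen : ∀ c : Nat, (f (arr.map (fun row => row.getD c 0))).length = R := by
      intro c
      simp only [hf]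
      split
      · simp [hRdef]
      · simp [hRdef]
    have hnewlen : ∀ col ∈ (List.range w).map
        (fun c => f (arr.map (fun row => row.getD c 0))), col.length = R := by
      intro col hcol
      obtain ⟨c, _, hc⟩ := List.mem_map.mp hcol
      rw [← hc]
      exact hcollen c
    have hnewne : (List.range w).map (fun c => f (arr.map (fun row => row.getD c 0))) ≠ [] := by
      simp only [ne_eq, List.map_eq_nil_iff, List.range_eq_nil]
      omega
    rw [zipstar_char R _ hnewne hnewlen]
    apply List.ext_getElem
    · simp [hRdef]
    intro r hr1 hr2
    have hr : r < R := by simpa using hr2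
    simp only [List.getElem_map, List.getElem_range]
    apply List.ext_getElem
    · rw [rowfold_length, pvInfect_length, hrect _ (List.getElem_mem (by simpa using hr1))]
      simp
    intro c hc1 hc2
    have hrowlen : arr[r].length = w := hrect _ (List.getElem_mem (by omega))
    have hc : c < w := by simpa using hc2
    have hcrow : c < arr[r].length := by omega
    simp only [List.getElem_map, List.getElem_range, Function.comp]
    -- LHS cell
    have hfl : c < (pvInfect arr arr[r]).length := by
      rw [pvInfect_length]; exact hcrow
    have hlhs : ((pvColsA arr).foldl (fun row col => row.set col 1) (pvInfect arr arr[r]))[c]'hc1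
        = if c ∈ pvColsA arr then 1 else if pvHit arr arr[r] then 1 else arr[r][c] := by
      rw [← List.getD_eq_getElem _ 0 hc1, rowfold_getD _ _ _ hfl]
      congr 1
      unfold pvInfect
      split_ifs with hh
      · rw [List.getD_eq_getElem _ _ (by simpa using hcrow), List.getElem_replicate]
      · exact List.getD_eq_getElem _ _ hcrow
    rw [hlhs]
    -- RHS cell
    have hcontains : (arr.map (fun row => row.getD c 0)).contains 1 = true ↔ c ∈ pvColsA arr := by
      rw [pvColsA_mem]
      simp only [List.contains_eq_mem, List.mem_map, decide_eq_true_eq]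
      constructor
      · rintro ⟨row, hrow, hv⟩
        exact ⟨row, hrow, hc, hv⟩
      · rintro ⟨row, hrow, _, hv⟩
        exact ⟨row, hrow, hv⟩
    have hrget : ∀ (l : List Int) (h' : r < l.length), l.getD r 0 = l[r]'h' := by
      intro l h'
      exact List.getD_eq_getElem _ _ h'
    simp only [hf]
    by_cases hcm : c ∈ pvColsA arr
    · rw [if_pos (hcontains.mpr hcm), if_pos hcm]
      rw [hrget _ (by simpa using hr), List.getElem_replicate]
    · rw [if_neg (fun h => hcm (hcontains.mp h)), if_neg hcm]
      have hziplen : r < ((arr.map (fun row => row.contains 1)).zip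
          (arr.map (fun row => row.getD c 0))).length := by
        simpa using hr
      rw [hrget _ (by simpa using hziplen)]
      simp only [List.getElem_map, List.getElem_zip]
      have hhit : pvHit arr arr[r] = arr[r].contains 1 := by
        rw [List.contains_eq_mem]
        by_cases h1 : (1 : Int) ∈ arr[r]
        · rw [(pvHit_iff arr arr[r] hrowlen).mpr h1]
          simp [h1]
        · have : pvHit arr arr[r] ≠ true := fun h => h1 ((pvHit_iff arr arr[r] hrowlen).mp h)
          simp [h1, Bool.eq_false_iff.mpr this]
      rw [hhit]
      split
      · rfl
      · exact (List.getD_eq_getElem _ _ hcrow).symm
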